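-- pv_equiv track=rewrite | github.com/dmndpl/power-output-capture | readagain.py | stream_to_rows
-- ===== SOURCE A (Python) =====
-- def stream_to_rows(stream):
--     rows = []
--     row = []
--     start = False
--
--     LINE_BREAKS = ["ABR", "ARR"]
--
--     for item in stream:
--         if start and item not in LINE_BREAKS:
--             row.append(item)
--         elif start and item in LINE_BREAKS:
--             rows.append(row)
--             row = []
--         elif not start and item in LINE_BREAKS:
--             start = True
--     # We don't care if item is not ABR and start is False
--
--     return rows
-- ===== SOURCE B (Python) =====
-- def stream_to_rows(stream):
--     items = list(stream)
--     idx = [i for i, x in enumerate(items) if x in ("ABR", "ARR")]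
--     return [items[i + 1:j] for i, j in zip(idx, idx[1:])]
-- ===== Notes on version B (the rewrite author's own statement) =====
-- stated objective: alternative
-- what changed: Replaces the stateful accumulator loop (rows/row/start flags) by an index-table pass: collect the positions of all marker tokens once, then build each row as a slice between consecutive marker positions.
import Mathlib
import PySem

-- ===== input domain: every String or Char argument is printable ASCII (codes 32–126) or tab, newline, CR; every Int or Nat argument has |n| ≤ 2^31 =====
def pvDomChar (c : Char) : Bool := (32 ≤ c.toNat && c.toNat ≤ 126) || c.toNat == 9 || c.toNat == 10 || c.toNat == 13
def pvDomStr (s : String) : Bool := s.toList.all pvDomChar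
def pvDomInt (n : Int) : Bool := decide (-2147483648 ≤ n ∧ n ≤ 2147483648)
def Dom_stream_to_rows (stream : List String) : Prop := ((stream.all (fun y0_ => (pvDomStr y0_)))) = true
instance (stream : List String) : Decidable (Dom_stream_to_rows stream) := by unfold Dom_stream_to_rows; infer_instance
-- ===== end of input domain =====

-- B replaces A's stateful accumulator loop (rows/row/start) by an index-table-plus-slicing pass (alternative decomposition, same cost).


-- ===== PORT A =====
-- the body of A's for-loop (state = (rows, row, start)); branches in A's order
def pvStepA (st : List (List String) × List String × Bool) (item : String) :
    List (List String) × List String × Bool :=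
  if st.2.2 = true ∧ item ∉ (["ABR", "ARR"] : List String) then (st.1, st.2.1 ++ [item], st.2.2)
  else if st.2.2 = true ∧ item ∈ (["ABR", "ARR"] : List String) then (st.1 ++ [st.2.1], [], st.2.2)
  else if st.2.2 = false ∧ item ∈ (["ABR", "ARR"] : List String) then (st.1, st.2.1, true)
  else st

def stream_to_rows (stream : List String) : List (List String) :=
  (stream.foldl pvStepA ([], [], false)).1

-- ===== PORT B =====
def stream_to_rows_alt (stream : List String) : List (List String) :=
  let items := stream
  let idx : List Int :=
    (PySem.List.enumerate items 0).filterMap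
      (fun p => if p.2 = "ABR" ∨ p.2 = "ARR" then some p.1 else none)
  (idx.zip (PySem.List.slice idx (some 1) none)).map
    (fun p => PySem.List.slice items (some (p.1 + 1)) (some p.2))

-- ===== PRECONDITION & SPEC =====
def Spec_stream_to_rows (stream : List String) (out : List (List String)) : Prop := out = stream_to_rows_alt stream
instance (stream : List String) (out : List (List String)) : Decidable (Spec_stream_to_rows stream out) := by unfold Spec_stream_to_rows; infer_instance

-- ===== CLAIM (what is proved, stated in full; the proofs are below) =====
def Claim_equal_stream_to_rows : Prop := ∀ (stream : List String), Dom_stream_to_rows stream → Spec_stream_to_rows stream (stream_to_rows stream)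

-- ===== LEMMAS AND PROOFS =====

abbrev pvMarker (x : String) : Prop := x = "ABR" ∨ x = "ARR"

theorem pvMem_iff (x : String) : x ∈ (["ABR", "ARR"] : List String) ↔ pvMarker x := by
  simp [pvMarker]

-- reference splitter: skip to the first marker, then accumulate rows
def pvGo : List String → List String → List (List String)
  | [], _ => []
  | x :: xs, acc => if pvMarker x then acc :: pvGo xs [] else pvGo xs (acc ++ [x])

def pvSplit : List String → List (List String)
  | [] => []
  | x :: xs => if pvMarker x then pvGo xs [] else pvSplit xs

-- Nat-valued marker positions
def pvIdx : List String → List Nat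
  | [] => []
  | x :: xs => (if pvMarker x then [0] else []) ++ (pvIdx xs).map (· + 1)

-- B restated over Nat indices
def pvBnat (l : List String) : List (List String) :=
  ((pvIdx l).zip (pvIdx l).tail).map (fun p => (l.drop (p.1 + 1)).take (p.2 - (p.1 + 1)))

-- step equations for A's loop body
theorem pvStepA_true_mark (rows : List (List String)) (row : List String) {it : String}
    (h : pvMarker it) : pvStepA (rows, row, true) it = (rows ++ [row], [], true) := by
  have h' : it ∈ (["ABR", "ARR"] : List String) := (pvMem_iff it).mpr h
  simp [pvStepA, h']

theorem pvStepA_true_nomark (rows : List (List String)) (row : List String) {it : String}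
    (h : ¬ pvMarker it) : pvStepA (rows, row, true) it = (rows, row ++ [it], true) := by
  have h' : it ∉ (["ABR", "ARR"] : List String) := fun hm => h ((pvMem_iff it).mp hm)
  simp [pvStepA, h']

theorem pvStepA_false_mark (rows : List (List String)) (row : List String) {it : String}
    (h : pvMarker it) : pvStepA (rows, row, false) it = (rows, row, true) := by
  have h' : it ∈ (["ABR", "ARR"] : List String) := (pvMem_iff it).mpr h
  simp [pvStepA, h']

theorem pvStepA_false_nomark (rows : List (List String)) (row : List String) {it : String}
    (h : ¬ pvMarker it) : pvStepA (rows, row, false) it = (rows, row, false) := by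
  have h' : it ∉ (["ABR", "ARR"] : List String) := fun hm => h ((pvMem_iff it).mp hm)
  simp [pvStepA, h']

theorem pvA_started (l : List String) (rows : List (List String)) (row : List String) :
    (l.foldl pvStepA (rows, row, true)).1 = rows ++ pvGo l row := by
  induction l generalizing rows row with
  | nil => simp [pvGo]
  | cons x xs ih =>
    by_cases h : pvMarker x
    · rw [List.foldl_cons, pvStepA_true_mark rows row h, ih]
      simp [pvGo, h]
    · rw [List.foldl_cons, pvStepA_true_nomark rows row h, ih]
      simp [pvGo, h]

theorem pvA_not_started (l : List String) (rows : List (List String)) :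
    (l.foldl pvStepA (rows, [], false)).1 = rows ++ pvSplit l := by
  induction l generalizing rows with
  | nil => simp [pvSplit]
  | cons x xs ih =>
    by_cases h : pvMarker x
    · rw [List.foldl_cons, pvStepA_false_mark rows [] h, pvA_started]
      simp [pvSplit, h]
    · rw [List.foldl_cons, pvStepA_false_nomark rows [] h, ih]
      simp [pvSplit, h]

theorem pvA_eq_split (l : List String) : stream_to_rows l = pvSplit l := by
  simpa [stream_to_rows] using pvA_not_started l []

-- enumerate-based marker indices are the shifted Nat indices
theorem pvF_shift (l : List String) (s : Int) :
    (PySem.List.enumerate l s).filterMap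
      (fun p => if p.2 = "ABR" ∨ p.2 = "ARR" then some p.1 else none)
    = (pvIdx l).map (fun (k : Nat) => (k : Int) + s) := by
  induction l generalizing s with
  | nil => simp [PySem.List.enumerate_nil, pvIdx]
  | cons x xs ih =>
    rw [PySem.List.enumerate_cons, List.filterMap_cons]
    by_cases h : x = "ABR" ∨ x = "ARR"
    · have hm : pvMarker x := h
      rw [if_pos h, ih]
      simp only [pvIdx, if_pos hm, List.singleton_append, List.map_cons, List.map_map]
      congr 1
      · simp
      · apply List.map_congr_left
        intro k _
        simp only [Function.comp_apply]
        push_cast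
        ring
    · have hm : ¬ pvMarker x := h
      rw [if_neg h, ih]
      simp only [pvIdx, if_neg hm, List.nil_append, List.map_map]
      apply List.map_congr_left
      intro k _
      simp only [Function.comp_apply]
      push_cast
      ring

theorem pvB_eq_Bnat (l : List String) : stream_to_rows_alt l = pvBnat l := by
  unfold stream_to_rows_alt pvBnat
  simp only [pvF_shift l 0]
  rw [PySem.List.slice_from_one]
  have htail : ((pvIdx l).map (fun (k : Nat) => (k : Int) + 0)).tail
      = ((pvIdx l).tail).map (fun (k : Nat) => (k : Int) + 0) := by
    cases pvIdx l <;> simp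
  rw [htail, List.zip_map, List.map_map]
  apply List.map_congr_left
  intro p _
  obtain ⟨a, b⟩ := p
  simp only [Function.comp_apply, Prod.map]
  have h1 : ((a : Int) + 0) + 1 = ((a + 1 : Nat) : Int) := by push_cast; ring
  have h2 : ((b : Int) + 0) = ((b : Nat) : Int) := by ring
  rw [h1, h2, PySem.List.slice_natCast]

-- shifting all indices by one and consing a non-index element leaves the rows unchanged
theorem pvB_shift (x : String) (xs : List String) (m : List Nat) :
    ((m.map (· + 1)).zip ((m.map (· + 1)).tail)).map
        (fun p => ((x :: xs).drop (p.1 + 1)).take (p.2 - (p.1 + 1)))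
    = (m.zip m.tail).map (fun p => (xs.drop (p.1 + 1)).take (p.2 - (p.1 + 1))) := by
  have htail : (m.map (· + 1)).tail = m.tail.map (· + 1) := by
    cases m <;> simp
  rw [htail, List.zip_map, List.map_map]
  apply List.map_congr_left
  intro p _
  obtain ⟨a, b⟩ := p
  simp only [Function.comp_apply, Prod.map]
  rw [List.drop_succ_cons]
  congr 1
  omega

theorem pvBnat_cons_nonmark (x : String) (xs : List String) (hm : ¬ pvMarker x) :
    pvBnat (x :: xs) = pvBnat xs := by
  unfold pvBnat
  simp only [pvIdx, if_neg hm, List.nil_append]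
  exact pvB_shift x xs (pvIdx xs)

theorem pvBnat_cons_mark (x : String) (xs : List String) (hm : pvMarker x)
    (i0 : Nat) (rest : List Nat) (hxs : pvIdx xs = i0 :: rest) :
    pvBnat (x :: xs) = xs.take i0 :: pvBnat xs := by
  unfold pvBnat
  simp only [pvIdx, if_pos hm, List.singleton_append, hxs, List.tail_cons,
    List.zip_cons_cons, List.map_cons]
  refine congrArg₂ List.cons ?_ ?_
  · simp
  · simpa using pvB_shift x xs (i0 :: rest)

theorem pvGo_no_marker (l : List String) (acc : List String) (h : pvIdx l = []) :
    pvGo l acc = [] := by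
  induction l generalizing acc with
  | nil => rfl
  | cons x xs ih =>
    by_cases hm : pvMarker x
    · simp [pvIdx, hm] at h
    · simp only [pvIdx, if_neg hm, List.nil_append, List.map_eq_nil_iff] at h
      rw [pvGo, if_neg hm]
      exact ih (acc ++ [x]) h

theorem pvGo_first_marker (l : List String) (acc : List String) (i0 : Nat) (rest : List Nat)
    (h : pvIdx l = i0 :: rest) :
    pvGo l acc = (acc ++ l.take i0) :: pvSplit l := by
  induction l generalizing acc i0 rest with
  | nil => simp [pvIdx] at h
  | cons x xs ih =>
    by_cases hm : pvMarker x
    · simp only [pvIdx, if_pos hm, List.singleton_append, List.cons.injEq] at h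
      obtain ⟨h0, -⟩ := h
      subst h0
      simp [pvGo, hm, pvSplit]
    · simp only [pvIdx, if_neg hm, List.nil_append] at h
      cases hxs : pvIdx xs with
      | nil => rw [hxs] at h; simp at h
      | cons j0 jrest =>
        rw [hxs, List.map_cons] at h
        obtain ⟨h0, -⟩ := List.cons.injEq .. ▸ h
        rw [pvGo, if_neg hm, ih (acc ++ [x]) j0 jrest hxs]
        rw [← h0]
        simp [pvSplit, hm, List.take_succ_cons]
    
theorem pvBnat_eq_split (l : List String) : pvBnat l = pvSplit l := by
  induction l with
  | nil => rfl
  | cons x xs ih =>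
    by_cases hm : pvMarker x
    · cases hxs : pvIdx xs with
      | nil =>
        unfold pvBnat
        simp only [pvIdx, if_pos hm, List.singleton_append, hxs, List.map_nil,
          List.tail_cons, List.zip_nil_right, List.map_nil]
        rw [pvSplit, if_pos hm, pvGo_no_marker xs [] hxs]
      | cons i0 rest =>
        rw [pvBnat_cons_mark x xs hm i0 rest hxs, ih, pvSplit, if_pos hm,
          pvGo_first_marker xs [] i0 rest hxs]
        simp
    · rw [pvBnat_cons_nonmark x xs hm, ih, pvSplit, if_neg hm]

-- ===== VERDICT (by name: the statement is the Claim_ definition above) =====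
theorem stream_to_rows_spec : Claim_equal_stream_to_rows := by
  intro stream _
  unfold Spec_stream_to_rows
  rw [pvA_eq_split, pvB_eq_Bnat, pvBnat_eq_split]
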